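-- pv_equiv track=rewrite | github.com/nbnbhattarai/recommender | naivebayes.py | adjustValue
-- ===== SOURCE A (Python) =====
-- def adjustValue(dict1,dict2,dict3):
--     for i in dict1:
--         if i not in dict2:
--             dict2[i] = 0
--         if i not in dict3:
--             dict3[i] = 0
--     for i in dict2:
--         if i not in dict1:
--             dict1[i] = 0
--         if i not in dict3:
--             dict3[i] = 0
--     for i in dict3:
--         if i not in dict1:
--             dict1[i] = 0
--         if i not in dict2:
--             dict2[i] = 0
--     return dict1,dict2,dict3
-- ===== SOURCE B (Python) =====
-- def adjustValue(dict1, dict2, dict3):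
--     # NOTE: builds and returns fresh dicts (A mutates its arguments in place);
--     # the return value is identical to A's.
--     union = dict.fromkeys(list(dict1) + list(dict2) + list(dict3))
--     def fill(d):
--         return {**d, **{k: 0 for k in union if k not in d}}
--     return fill(dict1), fill(dict2), fill(dict3)
-- ===== Notes on version B (the rewrite author's own statement) =====
-- stated objective: alternative
-- what changed: A incrementally mutates the three dicts with three cross-updating loops (each loop inserting one dict's keys into the two others, later loops seeing earlier insertions); B never mutates: it materializes the ordered union of all keys once via dict.fromkeys and rebuilds each result dict in one merge expression as the original dict merged with a zero-valued dict of its missing keys.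
import Mathlib
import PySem

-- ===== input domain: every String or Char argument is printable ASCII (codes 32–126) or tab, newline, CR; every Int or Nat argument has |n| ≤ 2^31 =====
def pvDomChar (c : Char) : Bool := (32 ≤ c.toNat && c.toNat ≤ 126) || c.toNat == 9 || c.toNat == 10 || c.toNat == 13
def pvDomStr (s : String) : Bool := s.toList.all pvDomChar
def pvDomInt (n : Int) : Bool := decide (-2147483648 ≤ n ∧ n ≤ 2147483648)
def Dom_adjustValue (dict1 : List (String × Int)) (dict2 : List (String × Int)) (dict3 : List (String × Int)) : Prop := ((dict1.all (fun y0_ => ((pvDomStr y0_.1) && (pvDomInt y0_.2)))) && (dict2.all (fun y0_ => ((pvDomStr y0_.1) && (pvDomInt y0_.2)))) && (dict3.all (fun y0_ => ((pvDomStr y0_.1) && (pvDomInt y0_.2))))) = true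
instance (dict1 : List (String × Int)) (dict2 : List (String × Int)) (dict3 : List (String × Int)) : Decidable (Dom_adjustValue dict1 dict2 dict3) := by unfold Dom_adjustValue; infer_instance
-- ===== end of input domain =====

-- B computes the ordered union of all keys once and rebuilds each result dict in one merge
-- expression (original dict ∪ zero-dict of its missing keys) instead of A's three
-- cross-updating mutation loops (objective: alternative). A mutates its argument dicts in
-- place, B builds fresh dicts; the equivalence proved here is about the returned triple only.

-- ===== PORT A =====
-- 'k in d' on a Python dict: key membership
def pvHasKey (d : List (String × Int)) (k : String) : Bool := (d.map Prod.fst).contains k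

-- the loop body all three of A's loops share: insert the current key with value 0
-- into each of the two other dicts when missing
def pvAddMissing (s : List (String × Int) × List (String × Int)) (p : String × Int) :
    List (String × Int) × List (String × Int) :=
  ((if pvHasKey s.1 p.1 then s.1 else s.1 ++ [(p.1, 0)]),
   (if pvHasKey s.2 p.1 then s.2 else s.2 ++ [(p.1, 0)]))

def adjustValue (dict1 : List (String × Int)) (dict2 : List (String × Int)) (dict3 : List (String × Int)) : (List (String × Int)) × (List (String × Int)) × (List (String × Int)) :=
  -- for i in dict1: add i to dict2/dict3 when missing
  let s1 := dict1.foldl pvAddMissing (dict2, dict3)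
  -- for i in dict2: add i to dict1/dict3 when missing (dict2 as mutated above)
  let s2 := s1.1.foldl pvAddMissing (dict1, s1.2)
  -- for i in dict3: add i to dict1/dict2 when missing (dict3 as mutated above)
  let s3 := s2.2.foldl pvAddMissing (s2.1, s1.1)
  (s3.1, s3.2, s2.2)

-- ===== PORT B =====
-- dict.fromkeys over a key list: CPython's insertion-ordered first-occurrence key sequence
def pyFromKeys (ks : List String) : List String :=
  ks.foldl (fun acc k => if acc.contains k then acc else acc ++ [k]) []

def adjustValue_alt (dict1 : List (String × Int)) (dict2 : List (String × Int)) (dict3 : List (String × Int)) : (List (String × Int)) × (List (String × Int)) × (List (String × Int)) :=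
  -- union = dict.fromkeys(list(dict1) + list(dict2) + list(dict3))
  let union := pyFromKeys (dict1.map Prod.fst ++ dict2.map Prod.fst ++ dict3.map Prod.fst)
  -- fill(d) = {**d, **{k: 0 for k in union if k not in d}}: since the comprehension's keys
  -- are exactly those absent from d, the merge is d's entries followed by the zero entries
  let fill := fun (d : List (String × Int)) =>
    d ++ (union.filter (fun k => !((d.map Prod.fst).contains k))).map (fun k => (k, (0 : Int)))
  (fill dict1, fill dict2, fill dict3)

-- ===== PRECONDITION & SPEC =====
def Spec_adjustValue (dict1 : List (String × Int)) (dict2 : List (String × Int)) (dict3 : List (String × Int)) (out : (List (String × Int)) × (List (String × Int)) × (List (String × Int))) : Prop := out = adjustValue_alt dict1 dict2 dict3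
instance (dict1 : List (String × Int)) (dict2 : List (String × Int)) (dict3 : List (String × Int)) (out : (List (String × Int)) × (List (String × Int)) × (List (String × Int))) : Decidable (Spec_adjustValue dict1 dict2 dict3 out) := by unfold Spec_adjustValue; infer_instance

-- ===== CLAIM (what is proved, stated in full; the proofs are below) =====
def Claim_equal_adjustValue : Prop := ∀ (dict1 : List (String × Int)) (dict2 : List (String × Int)) (dict3 : List (String × Int)), Dom_adjustValue dict1 dict2 dict3 → Spec_adjustValue dict1 dict2 dict3 (adjustValue dict1 dict2 dict3)

-- ===== LEMMAS AND PROOFS =====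

/-- 'add key with value 0 when missing' -/
def addK (d : List (String × Int)) (k : String) : List (String × Int) :=
  if pvHasKey d k then d else d ++ [(k, 0)]

def addAll (d : List (String × Int)) (ks : List String) : List (String × Int) :=
  ks.foldl addK d

theorem foldl_pvAddMissing (l : List (String × Int)) (a b : List (String × Int)) :
    l.foldl pvAddMissing (a, b) = (addAll a (l.map Prod.fst), addAll b (l.map Prod.fst)) := by
  induction l generalizing a b with
  | nil => rfl
  | cons p ps ih => simp [List.foldl, pvAddMissing, ih, addAll, addK]

theorem addAll_append (d : List (String × Int)) (ks1 ks2 : List String) :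
    addAll d (ks1 ++ ks2) = addAll (addAll d ks1) ks2 := by
  simp [addAll, List.foldl_append]

theorem hasKey_addK (d : List (String × Int)) (k' k : String) :
    pvHasKey (addK d k') k = (pvHasKey d k || k' == k) := by
  by_cases h : pvHasKey d k'
  · simp only [addK, h, if_pos]
    by_cases hk : k' = k
    · subst hk; simp [h]
    · simp [hk]
  · simp only [addK, h, Bool.false_eq_true]
    by_cases hk : k' = k
    · subst hk; simp [pvHasKey]
    · simp [pvHasKey, beq_eq_decide, hk, Ne.symm hk]

theorem hasKey_addAll (d : List (String × Int)) (ks : List String) (k : String) :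
    pvHasKey (addAll d ks) k = (pvHasKey d k || ks.contains k) := by
  induction ks generalizing d with
  | nil => simp [addAll]
  | cons x xs ih =>
    simp only [addAll, List.foldl_cons]
    rw [show (List.foldl addK (addK d x) xs) = addAll (addK d x) xs from rfl, ih,
        hasKey_addK]
    by_cases hx : x = k
    · subst hx; simp
    · simp [beq_eq_decide, hx, Ne.symm hx]

theorem addAll_absorb (d : List (String × Int)) (ks : List String)
    (h : ∀ k ∈ ks, pvHasKey d k = true) : addAll d ks = d := by
  induction ks with
  | nil => rfl
  | cons x xs ih =>
    have hx : pvHasKey d x = true := h x (by simp)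
    simp only [addAll, List.foldl_cons, addK, hx, if_pos]
    exact ih (fun k hk => h k (by simp [hk]))

theorem keys_addAll (d : List (String × Int)) (ks : List String) :
    ∃ E, (addAll d ks).map Prod.fst = d.map Prod.fst ++ E ∧ ∀ k ∈ E, k ∈ ks := by
  induction ks generalizing d with
  | nil => exact ⟨[], by simp [addAll]⟩
  | cons x xs ih =>
    simp only [addAll, List.foldl_cons]
    obtain ⟨E, hE, hsub⟩ := ih (addK d x)
    by_cases h : pvHasKey d x
    · refine ⟨E, ?_, fun k hk => by simp [hsub k hk]⟩
      simpa [addAll, addK, h] using hE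
    · refine ⟨x :: E, ?_, ?_⟩
      · simpa [addAll, addK, h] using hE
      · intro k hk
        rcases List.mem_cons.mp hk with rfl | hk
        · simp
        · simp [hsub k hk]

theorem hasKey_of_mem_keys (d : List (String × Int)) (k : String)
    (h : k ∈ d.map Prod.fst) : pvHasKey d k = true := by
  simp [pvHasKey, h]

/-- A characterises the result of A's three loops: each component is
    `addAll dᵢ (K1 ++ K2 ++ K3)` over the original key lists. -/
theorem adjustValue_eq_addAll (d1 d2 d3 : List (String × Int)) :
    adjustValue d1 d2 d3 =
      (addAll d1 (d1.map Prod.fst ++ d2.map Prod.fst ++ d3.map Prod.fst),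
       addAll d2 (d1.map Prod.fst ++ d2.map Prod.fst ++ d3.map Prod.fst),
       addAll d3 (d1.map Prod.fst ++ d2.map Prod.fst ++ d3.map Prod.fst)) := by
  unfold adjustValue
  simp only [foldl_pvAddMissing]
  set K1 := d1.map Prod.fst with hK1
  set K2 := d2.map Prod.fst with hK2
  set K3 := d3.map Prod.fst with hK3
  obtain ⟨E, hE, hEsub⟩ := keys_addAll d2 K1
  have habs1 : ∀ k ∈ K1, pvHasKey d1 k = true := fun k hk => hasKey_of_mem_keys d1 k hk
  have habs2 : ∀ k ∈ K2, pvHasKey d2 k = true := fun k hk => hasKey_of_mem_keys d2 k hk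
  have habs3 : ∀ k ∈ K3, pvHasKey d3 k = true := fun k hk => hasKey_of_mem_keys d3 k hk
  obtain ⟨F1, hF1, hF1sub⟩ := keys_addAll d3 K1
  obtain ⟨F2, hF2, hF2sub⟩ := keys_addAll (addAll d3 K1) ((addAll d2 K1).map Prod.fst)
  rw [hF1] at hF2
  have hK3b : (addAll (addAll d3 K1) ((addAll d2 K1).map Prod.fst)).map Prod.fst
      = K3 ++ (F1 ++ F2) := by rw [hF2, ← hK3, List.append_assoc]
  have hGsub : ∀ k ∈ F1 ++ F2, k ∈ K1 ∨ k ∈ K2 := by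
    intro k hk
    rcases List.mem_append.mp hk with hk | hk
    · exact Or.inl (hF1sub k hk)
    · have := hF2sub k hk
      rw [hE] at this
      rcases List.mem_append.mp this with h | h
      · exact Or.inr h
      · exact Or.inl (hEsub k h)
  have hmono12 : ∀ d ks, ∀ k, pvHasKey d k = true → pvHasKey (addAll d ks) k = true := by
    intro d ks k h; rw [hasKey_addAll, h]; rfl
  have hinK : ∀ d (ks : List String) k, k ∈ ks → pvHasKey (addAll d ks) k = true := by
    intro d ks k h; rw [hasKey_addAll]; simp [h]
  have hBsplit : ∀ d : List (String × Int),
      addAll d (K1 ++ K2 ++ K3) = addAll (addAll (addAll d K1) K2) K3 := by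
    intro d; rw [addAll_append, addAll_append]
  have hc3 : addAll (addAll d3 K1) ((addAll d2 K1).map Prod.fst)
      = addAll d3 (K1 ++ K2 ++ K3) := by
    rw [hE, hBsplit d3, ← hK2, addAll_append]
    rw [addAll_absorb _ E (fun k hk => hmono12 _ _ _ (hinK d3 K1 k (hEsub k hk)))]
    rw [addAll_absorb _ K3 (fun k hk => hmono12 _ _ _ (hmono12 _ _ _ (habs3 k hk)))]
  have hd1b : addAll d1 ((addAll d2 K1).map Prod.fst) = addAll d1 K2 := by
    rw [hE, addAll_append]
    exact addAll_absorb _ E (fun k hk => hmono12 _ _ _ (habs1 k (hEsub k hk)))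
  have hc1 : addAll (addAll d1 ((addAll d2 K1).map Prod.fst))
        ((addAll (addAll d3 K1) ((addAll d2 K1).map Prod.fst)).map Prod.fst)
      = addAll d1 (K1 ++ K2 ++ K3) := by
    rw [hd1b, hK3b, hBsplit d1, addAll_absorb d1 K1 habs1, addAll_append]
    refine addAll_absorb _ (F1 ++ F2) (fun k hk => ?_)
    rcases hGsub k hk with h | h
    · exact hmono12 _ _ _ (hmono12 _ _ _ (habs1 k h))
    · exact hmono12 _ _ _ (hinK d1 K2 k h)
  have hc2 : addAll (addAll d2 K1)
        ((addAll (addAll d3 K1) ((addAll d2 K1).map Prod.fst)).map Prod.fst)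
      = addAll d2 (K1 ++ K2 ++ K3) := by
    rw [hK3b, hBsplit d2, addAll_absorb (addAll d2 K1) K2
        (fun k hk => hmono12 _ _ _ (habs2 k hk)), addAll_append]
    refine addAll_absorb _ (F1 ++ F2) (fun k hk => ?_)
    rcases hGsub k hk with h | h
    · exact hmono12 _ _ _ (hinK d2 K1 k h)
    · exact hmono12 _ _ _ (hmono12 _ _ _ (habs2 k h))
  exact Prod.ext (by simpa using hc1) (Prod.ext (by simpa using hc2) (by simpa using hc3))

/-- the keys `miss dk ks`: first occurrences in `ks` of keys not in `dk` -/
def miss (dk : List String) : List String → List String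
  | [] => []
  | k :: ks => if k ∈ dk then miss dk ks else k :: miss (dk ++ [k]) ks

theorem addAll_eq_miss (ks : List String) (d : List (String × Int)) :
    addAll d ks = d ++ (miss (d.map Prod.fst) ks).map (fun k => (k, (0 : Int))) := by
  induction ks generalizing d with
  | nil => simp [addAll, miss]
  | cons k ks ih =>
    simp only [addAll, List.foldl_cons, miss]
    by_cases h : k ∈ d.map Prod.fst
    · have hb : pvHasKey d k = true := by simp [pvHasKey, h]
      rw [show addK d k = d from by simp [addK, hb], if_pos h]
      exact ih d
    · have hb : ¬ pvHasKey d k = true := by simp [pvHasKey, h]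
      rw [show addK d k = d ++ [(k, (0:Int))] from by simp [addK, hb], if_neg h]
      have := ih (d ++ [(k, (0:Int))])
      simpa [List.append_assoc] using this

theorem miss_congr (dk1 dk2 : List String) (ks : List String)
    (h : ∀ k, k ∈ dk1 ↔ k ∈ dk2) : miss dk1 ks = miss dk2 ks := by
  induction ks generalizing dk1 dk2 with
  | nil => rfl
  | cons k ks ih =>
    by_cases hc : k ∈ dk2
    · rw [miss, miss, if_pos ((h k).mpr hc), if_pos hc]; exact ih dk1 dk2 h
    · rw [miss, miss, if_neg (fun hx => hc ((h k).mp hx)), if_neg hc]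
      exact congrArg _ (ih (dk1 ++ [k]) (dk2 ++ [k]) (fun x => by simp [h x]))

theorem filter_fromKeys_aux (ks a dk : List String) :
    (ks.foldl (fun acc k => if acc.contains k then acc else acc ++ [k]) a).filter
        (fun k => !dk.contains k)
      = a.filter (fun k => !dk.contains k) ++ miss (dk ++ a) ks := by
  induction ks generalizing a with
  | nil => simp [miss]
  | cons k ks ih =>
    simp only [List.foldl_cons, miss]
    by_cases ha : k ∈ a
    · rw [if_pos (by simpa using ha), ih a,
        if_pos (List.mem_append.mpr (Or.inr ha))]
    · rw [if_neg (by simpa using ha), ih (a ++ [k])]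
      by_cases hd : k ∈ dk
      · rw [if_pos (List.mem_append.mpr (Or.inl hd))]
        rw [show (a ++ [k]).filter (fun k => !dk.contains k)
              = a.filter (fun k => !dk.contains k) from by
            simp [List.filter_append, hd]]
        rw [miss_congr (dk ++ (a ++ [k])) (dk ++ a) ks
          (fun x => by
            by_cases hx : x = k
            · subst hx; simp [hd]
            · simp [hx])]
      · rw [if_neg (by
            intro hx
            rcases List.mem_append.mp hx with h | h
            · exact hd h
            · exact ha h)]
        rw [show (a ++ [k]).filter (fun k => !dk.contains k)
              = a.filter (fun k => !dk.contains k) ++ [k] from by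
            simp [List.filter_append, hd]]
        rw [miss_congr (dk ++ (a ++ [k])) ((dk ++ a) ++ [k]) ks
          (fun x => by simp)]
        simp

theorem alt_eq_addAll (d : List (String × Int)) (K : List String) :
    d ++ ((pyFromKeys K).filter (fun k => !((d.map Prod.fst).contains k))).map
        (fun k => (k, (0 : Int)))
      = addAll d K := by
  rw [pyFromKeys, filter_fromKeys_aux K [] (d.map Prod.fst)]
  simp only [List.filter_nil, List.nil_append, List.append_nil]
  exact (addAll_eq_miss K d).symm

-- ===== VERDICT (by name: the statement is the Claim_ definition above) =====
theorem adjustValue_spec : Claim_equal_adjustValue := by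
  intro d1 d2 d3 _
  show adjustValue d1 d2 d3 = adjustValue_alt d1 d2 d3
  rw [adjustValue_eq_addAll]
  simp only [adjustValue_alt]
  rw [alt_eq_addAll, alt_eq_addAll, alt_eq_addAll]
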